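-- pv_equiv track=rewrite | github.com/zmchrist/bluebeam-pdf-converter | backend/app/services/icon_config.py | get_model_text
-- ===== SOURCE A (Python) =====
-- def get_model_text(subject: str) -> str:
--     """
--     Extract model text from deployment subject.
--
--     Parses the subject name to extract just the model identifier,
--     removing category prefixes and brand names.
--
--     Args:
--         subject: Deployment subject (e.g., "AP - Cisco MR36H")
--
--     Returns:
--         Model text for display (e.g., "MR36H")
--
--     Examples:
--         >>> get_model_text("AP - Cisco MR36H")
--         'MR36H'
--         >>> get_model_text("HL - Artist")
--         'Artist'
--         >>> get_model_text("P2P - Ubiquiti NanoBeam")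
--         'NanoBeam'
--         >>> get_model_text("DIST - Mini NOC")
--         'Mini NOC'
--     """
--     if " - " in subject:
--         parts = subject.split(" - ")
--         if len(parts) >= 2:
--             # Get the model part (after the prefix)
--             model_part = parts[-1]
--             # Remove brand prefix if present
--             for brand in [
--                 "Cisco ", "Ubiquiti ", "Axis ", "Yealink ", "BrightSign ",
--                 "Fortinet ", "Meraki ", "EcoFlow ", "Liebert ", "Netgear ", "Netonix ",
--             ]:
--                 if model_part.startswith(brand):
--                     return model_part[len(brand):]
--             return model_part
--     return subject
-- ===== SOURCE B (Python) =====
-- BRANDS = {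
--     "Cisco", "Ubiquiti", "Axis", "Yealink", "BrightSign",
--     "Fortinet", "Meraki", "EcoFlow", "Liebert", "Netgear", "Netonix",
-- }
--
--
-- def get_model_text(subject: str) -> str:
--     if " - " not in subject:
--         return subject
--     model_part = subject.split(" - ")[-1]
--     first, sep, rest = model_part.partition(" ")
--     if sep and first in BRANDS:
--         return rest
--     return model_part
-- ===== Notes on version B (the rewrite author's own statement) =====
-- stated objective: idiomatic
-- what changed: Replaces the per-brand startswith loop (11 prefix scans) with a single partition at the first space and one set-membership test of the leading word.
import Mathlib
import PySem

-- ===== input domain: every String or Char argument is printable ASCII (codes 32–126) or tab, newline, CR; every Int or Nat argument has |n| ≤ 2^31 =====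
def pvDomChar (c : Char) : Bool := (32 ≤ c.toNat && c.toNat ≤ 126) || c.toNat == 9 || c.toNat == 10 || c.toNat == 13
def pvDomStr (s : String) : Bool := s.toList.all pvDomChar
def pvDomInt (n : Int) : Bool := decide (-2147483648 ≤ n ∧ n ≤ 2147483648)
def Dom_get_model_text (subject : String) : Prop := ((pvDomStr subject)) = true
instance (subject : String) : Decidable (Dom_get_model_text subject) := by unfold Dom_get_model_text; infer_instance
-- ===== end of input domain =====

-- B replaces A's per-brand startswith loop by one partition at the first space plus a set lookup of the leading word (idiomatic; same cost).

def pvSep : List Char := " - ".toList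

-- ===== PORT A =====
-- A's brand list, with the trailing spaces
def pvBrandsA : List (List Char) :=
  ["Cisco ".toList, "Ubiquiti ".toList, "Axis ".toList, "Yealink ".toList,
   "BrightSign ".toList, "Fortinet ".toList, "Meraki ".toList, "EcoFlow ".toList,
   "Liebert ".toList, "Netgear ".toList, "Netonix ".toList]

-- the 'for brand in [...]' loop with its early return
def pvBrandLoop : List (List Char) → List Char → List Char
  | [], mp => mp
  | b :: bs, mp =>
    if PySem.Chars.startswith mp b then mp.drop b.length else pvBrandLoop bs mp

def get_model_text (subject : String) : String :=
  let s := subject.toList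
  if PySem.Chars.isIn pvSep s then
    let parts := PySem.Chars.splitOn s pvSep
    if 2 ≤ parts.length then
      let mp := PySem.List.pyGetD parts (-1) []   -- parts[-1]
      String.ofList (pvBrandLoop pvBrandsA mp)
    else subject
  else subject

-- ===== PORT B =====
-- B's BRANDS set: the brand words without trailing spaces
def pvBrandWords : List (List Char) :=
  ["Cisco".toList, "Ubiquiti".toList, "Axis".toList, "Yealink".toList,
   "BrightSign".toList, "Fortinet".toList, "Meraki".toList, "EcoFlow".toList,
   "Liebert".toList, "Netgear".toList, "Netonix".toList]

def pvNotSpace (c : Char) : Bool := c ≠ ' '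

def get_model_text_alt (subject : String) : String :=
  let s := subject.toList
  if PySem.Chars.isIn pvSep s then
    let mp := PySem.List.pyGetD (PySem.Chars.splitOn s pvSep) (-1) []
    -- model_part.partition(" ") ported by hand: cut at the FIRST space (exact for a 1-char separator)
    let first := mp.takeWhile pvNotSpace
    match mp.dropWhile pvNotSpace with
    | [] => String.ofList mp            -- sep == "": no space in model_part
    | _ :: rest =>
      if PySem.Set.contains (PySem.Set.ofList pvBrandWords) first then String.ofList rest
      else String.ofList mp
  else subject

-- ===== PRECONDITION & SPEC =====
def Spec_get_model_text (subject : String) (out : String) : Prop := out = get_model_text_alt subject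
instance (subject : String) (out : String) : Decidable (Spec_get_model_text subject out) := by unfold Spec_get_model_text; infer_instance

-- ===== CLAIM (what is proved, stated in full; the proofs are below) =====
def Claim_equal_get_model_text : Prop := ∀ (subject : String), Dom_get_model_text subject → Spec_get_model_text subject (get_model_text subject)

-- ===== LEMMAS AND PROOFS =====

-- splitOn.go yields at least acc.length + 1 pieces
lemma pv_go_len (sep : List Char) : ∀ (fuel : Nat) (l cur : List Char) (acc : List (List Char)),
    acc.length + 1 ≤ (PySem.Chars.splitOn.go sep fuel l cur acc).length := by
  intro fuel
  induction fuel with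
  | zero => intro l cur acc; simp [PySem.Chars.splitOn.go]
  | succ f ih =>
    intro l cur acc
    cases l with
    | nil => simp [PySem.Chars.splitOn.go]
    | cons c rest =>
      simp only [PySem.Chars.splitOn.go]
      split
      · have := ih (List.drop sep.length (c :: rest)) [] (cur.reverse :: acc)
        simp at this; omega
      · exact ih rest (c :: cur) acc

-- if sep occurs in l (and fuel covers l), splitOn.go yields at least acc.length + 2 pieces
lemma pv_go_two (sep : List Char) (hsep : sep ≠ []) :
    ∀ (fuel : Nat) (l cur : List Char) (acc : List (List Char)),
    l.length < fuel → (∃ j, sep <+: l.drop j) →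
    acc.length + 2 ≤ (PySem.Chars.splitOn.go sep fuel l cur acc).length := by
  intro fuel
  induction fuel with
  | zero => intro l cur acc h; omega
  | succ f ih =>
    intro l cur acc hlen hocc
    cases l with
    | nil =>
      obtain ⟨j, hj⟩ := hocc
      simp at hj
      exact absurd hj hsep
    | cons c rest =>
      simp only [PySem.Chars.splitOn.go]
      split
      · have := pv_go_len sep f (List.drop sep.length (c :: rest)) [] (cur.reverse :: acc)
        simp at this; omega
      · rename_i hnp
        obtain ⟨j, hj⟩ := hocc
        cases j with
        | zero =>
          rw [List.drop_zero, ← List.isPrefixOf_iff_prefix] at hj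
          exact absurd hj (by simpa using hnp)
        | succ j' =>
          simp only [List.length_cons] at hlen
          refine ih rest (c :: cur) acc (by omega) ⟨j', ?_⟩
          simpa using hj

-- splitting a word-space-tail list at the first space
lemma pv_split_space (w t : List Char) (hw : ' ' ∉ w) :
    (w ++ ' ' :: t).takeWhile pvNotSpace = w ∧
    (w ++ ' ' :: t).dropWhile pvNotSpace = ' ' :: t := by
  induction w with
  | nil => constructor <;> simp [pvNotSpace]
  | cons c w' ih =>
    simp only [List.mem_cons, not_or] at hw
    have hc : pvNotSpace c = true := by simp [pvNotSpace]; exact fun h => hw.1 h.symm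
    have := ih hw.2
    simp only [List.cons_append, List.takeWhile_cons, List.dropWhile_cons, hc, if_true,
      this.1, this.2, and_self]

-- A's brand loop, over words-with-trailing-space, equals B's partition-and-lookup
lemma pv_brandLoop_eq (ws : List (List Char)) (hws : ∀ w ∈ ws, ' ' ∉ w) (mp : List Char) :
    pvBrandLoop (ws.map (· ++ [' '])) mp =
      (match mp.dropWhile pvNotSpace with
       | [] => mp
       | _ :: rest => if mp.takeWhile pvNotSpace ∈ ws then rest else mp) := by
  induction ws with
  | nil =>
    cases h : mp.dropWhile pvNotSpace <;> simp [pvBrandLoop]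
  | cons w ws' ih =>
    have hw : ' ' ∉ w := hws w (by simp)
    simp only [List.map_cons, pvBrandLoop]
    by_cases hst : PySem.Chars.startswith mp (w ++ [' ']) = true
    · have hpre := (PySem.Chars.startswith_iff mp (w ++ [' '])).mp hst
      obtain ⟨t, ht⟩ := hpre
      have hmp : mp = w ++ ' ' :: t := by rw [← ht]; simp
      subst hmp
      have hsp := pv_split_space w t hw
      have hdrop : (w ++ ' ' :: t).drop (w ++ [' ']).length = t := by
        have : w ++ ' ' :: t = (w ++ [' ']) ++ t := by simp
        rw [this, List.drop_left]
      rw [if_pos hst, hdrop, hsp.2, hsp.1]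
      simp
    · rw [if_neg hst, ih (fun x hx => hws x (by simp [hx]))]
      cases h : mp.dropWhile pvNotSpace with
      | nil => rfl
      | cons d rest =>
        have hne : mp.takeWhile pvNotSpace ≠ w := by
          intro heq
          apply hst
          have hd : pvNotSpace d = false := by
            have hnn : mp.dropWhile pvNotSpace ≠ [] := by simp [h]
            have := List.head_dropWhile_not (p := pvNotSpace) (l := mp) hnn
            simpa [h] using this
          have hd' : d = ' ' := by simpa [pvNotSpace] using hd
          rw [PySem.Chars.startswith_iff]
          refine ⟨rest, ?_⟩
          conv_rhs => rw [← List.takeWhile_append_dropWhile (p := pvNotSpace) (l := mp)]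
          rw [heq, h, hd']
          simp
        simp only [List.mem_cons, hne, false_or]

lemma pv_brandsA_eq : pvBrandsA = pvBrandWords.map (· ++ [' ']) := by decide

lemma pv_brandWords_space : ∀ w ∈ pvBrandWords, ' ' ∉ w := by decide

lemma pv_ofList_brandWords : PySem.Set.ofList pvBrandWords = pvBrandWords := by decide

-- ===== VERDICT (by name: the statement is the Claim_ definition above) =====
theorem get_model_text_spec : Claim_equal_get_model_text := by
  intro subject _
  unfold Spec_get_model_text get_model_text get_model_text_alt
  by_cases hin : PySem.Chars.isIn pvSep subject.toList = true
  · rw [if_pos hin, if_pos hin]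
    have hocc : ∃ j, pvSep <+: subject.toList.drop j := by
      rw [PySem.Chars.exists_prefix_drop_iff_isIn]; exact hin
    have h2 : 2 ≤ (PySem.Chars.splitOn subject.toList pvSep).length := by
      have := pv_go_two pvSep (by decide) (subject.toList.length + 1)
        subject.toList [] [] (by omega) hocc
      simpa [PySem.Chars.splitOn] using this
    rw [if_pos h2]
    simp only [pv_brandsA_eq, pv_brandLoop_eq pvBrandWords pv_brandWords_space,
      pv_ofList_brandWords]
    cases h : (PySem.List.pyGetD (PySem.Chars.splitOn subject.toList pvSep) (-1)
        ([] : List Char)).dropWhile pvNotSpace with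
    | nil => rfl
    | cons d rest =>
      dsimp only
      by_cases hmem : (PySem.List.pyGetD (PySem.Chars.splitOn subject.toList pvSep) (-1)
          ([] : List Char)).takeWhile pvNotSpace ∈ pvBrandWords
      · rw [if_pos hmem, if_pos (by simp [PySem.Set.contains, hmem])]
      · rw [if_neg hmem, if_neg (by simp [PySem.Set.contains, hmem])]
  · rw [if_neg hin, if_neg hin]
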